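-- pv_equiv track=rewrite | github.com/TranMinhKhang258/Khang__ThucHanh_Buoi1_ctdl | Chuong2/Bai3.py | TrungHang
-- ===== SOURCE A (Python) =====
-- def TrungHang(matrix):
--     if len(matrix) != len(matrix[0]):
--         return False
--     rows_dict = {}
--     for row in matrix:
--         row_string = ''.join(map(str, row))
--         if row_string in rows_dict:
--             return True
--         else:
--             rows_dict[row_string] = True
--     return False
-- ===== SOURCE B (Python) =====
-- def TrungHang(matrix):
--     if len(matrix) != len(matrix[0]):
--         return False
--     serialized = sorted(''.join(map(str, row)) for row in matrix)
--     for a, b in zip(serialized, serialized[1:]):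
--         if a == b:
--             return True
--     return False
-- ===== Notes on version B (the rewrite author's own statement) =====
-- stated objective: alternative
-- what changed: Replaces the incremental dict of seen row-strings with sort-then-scan: serialize all rows with the same ''.join(map(str,row)) expression, sort the strings, and report a duplicate iff two adjacent sorted strings are equal.
import Mathlib
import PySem

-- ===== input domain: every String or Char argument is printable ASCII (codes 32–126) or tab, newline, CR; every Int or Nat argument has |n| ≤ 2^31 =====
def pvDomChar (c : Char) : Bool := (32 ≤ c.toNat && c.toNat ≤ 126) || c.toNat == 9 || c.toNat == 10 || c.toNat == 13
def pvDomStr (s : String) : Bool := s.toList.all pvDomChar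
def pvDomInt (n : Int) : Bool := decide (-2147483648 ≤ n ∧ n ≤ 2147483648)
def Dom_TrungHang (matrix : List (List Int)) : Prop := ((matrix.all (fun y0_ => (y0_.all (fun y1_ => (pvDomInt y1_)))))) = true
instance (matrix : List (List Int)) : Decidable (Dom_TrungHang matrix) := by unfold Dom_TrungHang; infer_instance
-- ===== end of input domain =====

-- B replaces A's incremental seen-dict with sort-then-scan over the same row serializations (alternative decomposition, similar cost).


-- ===== PORT A =====
-- ''.join(map(str, row)) — the row serialization both Pythons share verbatim
def serRow (row : List Int) : String :=
  PySem.Str.join "" (row.map PySem.Int.toStr)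

-- the 'for row in matrix' loop with early return and the seen-dict
def TrungHangLoop : List (List Int) → PySem.Dict String Bool → Bool
  | [], _ => false
  | row :: rest, d =>
    let s := serRow row
    if d.contains s then true
    else TrungHangLoop rest (d.insert s true)

def TrungHang (matrix : List (List Int)) : Bool :=
  match PySem.List.pyGet? matrix 0 with
  | none => false   -- unreachable under Pre_ (matrix[0] raises IndexError on [])
  | some r0 =>
    if (matrix.length : Int) ≠ (r0.length : Int) then false
    else TrungHangLoop matrix PySem.Dict.empty

-- ===== PORT B =====
def TrungHang_alt (matrix : List (List Int)) : Bool :=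
  match PySem.List.pyGet? matrix 0 with
  | none => false   -- unreachable under Pre_ (matrix[0] raises IndexError on [])
  | some r0 =>
    if (matrix.length : Int) ≠ (r0.length : Int) then false
    else
      let serialized := PySem.List.sorted (matrix.map serRow) (fun x => x) false
      -- 'for a, b in zip(serialized, serialized[1:]): if a == b: return True'
      (serialized.zip (serialized.drop 1)).any (fun p => p.1 == p.2)

-- ===== PRECONDITION & SPEC =====
-- Pre_ excludes only the empty matrix, on which both Pythons raise IndexError at matrix[0].
def Pre_TrungHang (matrix : List (List Int)) : Prop := matrix ≠ []
instance (matrix : List (List Int)) : Decidable (Pre_TrungHang matrix) := by unfold Pre_TrungHang; infer_instance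
def pvWitness_TrungHang : List (List Int) := [[1, 2], [1, 2]]

def Spec_TrungHang (matrix : List (List Int)) (out : Bool) : Prop := out = TrungHang_alt matrix
instance (matrix : List (List Int)) (out : Bool) : Decidable (Spec_TrungHang matrix out) := by unfold Spec_TrungHang; infer_instance

-- ===== CLAIM (what is proved, stated in full; the proofs are below) =====
def Claim_equal_TrungHang : Prop := ∀ (matrix : List (List Int)), Dom_TrungHang matrix → Pre_TrungHang matrix → Spec_TrungHang matrix (TrungHang matrix)

-- ===== LEMMAS AND PROOFS =====

-- A's loop returns true iff some serialized row is already a dict key or the serializations repeat.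
theorem loop_true_iff (rows : List (List Int)) (d : PySem.Dict String Bool) :
    TrungHangLoop rows d = true ↔
      ((∃ s ∈ rows.map serRow, d.contains s = true) ∨ ¬ (rows.map serRow).Nodup) := by
  induction rows generalizing d with
  | nil => simp [TrungHangLoop]
  | cons r rs ih =>
    by_cases h : d.contains (serRow r) = true
    · simp [TrungHangLoop, h]
    · rw [show TrungHangLoop (r :: rs) d = TrungHangLoop rs (d.insert (serRow r) true) from by
        simp [TrungHangLoop, h], ih]
      simp only [List.map_cons, List.mem_cons, List.nodup_cons]
      constructor
      · rintro (⟨s, hs, hc⟩ | hnd)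
        · rw [PySem.Dict.contains_insert] at hc
          rcases Bool.or_eq_true_iff.mp hc with hc | hc
          · have heq : s = serRow r := beq_iff_eq.mp hc
            right; intro ⟨hmem, _⟩; exact hmem (heq ▸ hs)
          · exact Or.inl ⟨s, Or.inr hs, hc⟩
        · right; intro ⟨_, hnd'⟩; exact hnd hnd'
      · rintro (⟨s, hs, hc⟩ | hnd)
        · rcases hs with rfl | hs
          · exact absurd hc h
          · refine Or.inl ⟨s, hs, ?_⟩
            rw [PySem.Dict.contains_insert, hc, Bool.or_true]
        · by_cases hmem : serRow r ∈ rs.map serRow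
          · exact Or.inl ⟨serRow r, hmem, by rw [PySem.Dict.contains_insert]; simp⟩
          · right; intro hnd'; exact hnd ⟨hmem, hnd'⟩

-- in a ≤-sorted list, an adjacent equal pair exists iff the list is not Nodup
theorem adj_true_iff : ∀ (l : List String), l.Pairwise (· ≤ ·) →
    ((l.zip (l.drop 1)).any (fun p => p.1 == p.2) = true ↔ ¬ l.Nodup)
  | [], _ => by simp
  | [a], _ => by simp
  | a :: b :: t, hp => by
    have hp' : (b :: t).Pairwise (· ≤ ·) := hp.tail
    have hab : a ≤ b := (List.pairwise_cons.mp hp).1 b (by simp)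
    have ih := adj_true_iff (b :: t) hp'
    by_cases he : a = b
    · subst he
      simp [List.any_cons, List.nodup_cons]
    · have hzip : ((a :: b :: t).zip ((a :: b :: t).drop 1)).any (fun p => p.1 == p.2)
          = ((b :: t).zip ((b :: t).drop 1)).any (fun p => p.1 == p.2) := by
        simp [he]
      rw [hzip, ih]
      have hnotmem : a ∉ b :: t := by
        intro hmem
        rcases List.mem_cons.mp hmem with rfl | hmem
        · exact he rfl
        · have hba : b ≤ a := (List.pairwise_cons.mp hp').1 a hmem
          exact he (le_antisymm hab hba)
      constructor
      · intro hnd hnd'; exact hnd hnd'.tail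
      · intro hnd hnd'
        exact hnd (List.nodup_cons.mpr ⟨hnotmem, hnd'⟩)

-- ===== VERDICT (by name: the statement is the Claim_ definition above) =====
theorem TrungHang_spec : Claim_equal_TrungHang := by
  intro matrix _ _
  unfold Spec_TrungHang TrungHang TrungHang_alt
  cases hg : PySem.List.pyGet? matrix 0 with
  | none => rfl
  | some r0 =>
    by_cases hlen : (matrix.length : Int) ≠ (r0.length : Int)
    · simp [hlen]
    · simp only [hlen, if_neg, not_false_iff]
      set l := matrix.map serRow with hl
      set s := PySem.List.sorted l (fun x => x) false with hs
      have hperm : s.Perm l := PySem.List.sorted_perm l _ _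
      have hpw : s.Pairwise (· ≤ ·) := by
        simpa using PySem.List.sorted_pairwise l (fun x => x)
      rw [Bool.eq_iff_iff, loop_true_iff, adj_true_iff s hpw, hperm.nodup_iff]
      simp [PySem.Dict.contains_empty, hl]
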